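-- pv_equiv track=rewrite | github.com/electronicayciencia/rfid-rw | soft_pc/em4205.py | _num2addr
-- ===== SOURCE A (Python) =====
-- def _num2addr(n):
--     """
--     Convert a 4bit number to Address bit format
--
--     Input
--         4 bit number
--     Output
--         7 bit number
--     """
--
--     p = 0  # even parity bit
--     a = 0  # address
--
--     for _ in range(4):
--         a <<= 1
--         a |= (n & 1)
--         p ^= (n & 1)
--         n >>= 1
--
--     a <<= 3  # 00 + parity
--     a |= p
--
--     return a
-- ===== SOURCE B (Python) =====
-- # 16-entry lookup table: entry m is the 7-bit address word for nibble m,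
-- # i.e. (bit-reversed nibble << 3) | even-parity-bit.
-- _ADDR_TABLE = [0, 65, 33, 96, 17, 80, 48, 113,
--                9, 72, 40, 105, 24, 89, 57, 120]
--
--
-- def _num2addr(n):
--     return _ADDR_TABLE[n % 16]
-- ===== Notes on version B (the rewrite author's own statement) =====
-- stated objective: simpler
-- what changed: Replaced the four-iteration bit-reverse-and-parity loop with a single indexing into a precomputed sixteen-entry lookup table keyed by the low nibble.
import Mathlib
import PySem

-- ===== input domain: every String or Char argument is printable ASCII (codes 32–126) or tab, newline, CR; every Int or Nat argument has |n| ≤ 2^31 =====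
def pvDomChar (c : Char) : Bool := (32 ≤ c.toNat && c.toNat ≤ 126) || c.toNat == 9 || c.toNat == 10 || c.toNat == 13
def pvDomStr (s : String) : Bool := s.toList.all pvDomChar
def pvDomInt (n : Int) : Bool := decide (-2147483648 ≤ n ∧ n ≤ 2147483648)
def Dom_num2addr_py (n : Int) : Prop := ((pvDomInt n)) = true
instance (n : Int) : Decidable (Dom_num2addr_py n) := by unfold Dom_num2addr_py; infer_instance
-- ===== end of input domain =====

-- ===== PORT A =====
-- A: loop 4 times, shifting the reversed nibble into `a`, xor-accumulating parity `p`.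
def num2addr_py (n : Int) : Int :=
  let s := (List.range 4).foldl
    (fun (st : Int × Int × Int) _ =>
      let p := st.1
      let a := st.2.1
      let m := st.2.2
      let a := PySem.Int.bor (a <<< (1 : Nat)) (PySem.Int.band m 1)
      let p := PySem.Int.bxor p (PySem.Int.band m 1)
      (p, a, m >>> (1 : Nat)))
    (0, 0, n)
  PySem.Int.bor (s.2.1 <<< (3 : Nat)) s.1

-- ===== PORT B =====
-- B: one lookup in a precomputed 16-entry table, indexed by n % 16.
def addrTable : List Int := [0, 65, 33, 96, 17, 80, 48, 113, 9, 72, 40, 105, 24, 89, 57, 120]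

def num2addr_py_alt (n : Int) : Int :=
  -- index `n % 16` is always in [0, 16), so the lookup never misses
  (PySem.List.pyGet? addrTable (PySem.Int.mod n 16)).getD 0

-- ===== PRECONDITION & SPEC =====
def Spec_num2addr_py (n : Int) (out : Int) : Prop := out = num2addr_py_alt n
instance (n : Int) (out : Int) : Decidable (Spec_num2addr_py n out) := by unfold Spec_num2addr_py; infer_instance

-- ===== CLAIM (what is proved, stated in full; the proofs are below) =====
def Claim_equal_num2addr_py : Prop := ∀ (n : Int), Dom_num2addr_py n → Spec_num2addr_py n (num2addr_py n)

-- ===== LEMMAS AND PROOFS =====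
theorem band_one_emod (m : Int) : PySem.Int.band m 1 = m % 2 := by
  rw [PySem.Int.band_one, PySem.Int.mod_eq_emod_of_pos (by norm_num)]

theorem shiftRight_one_div (m : Int) : m >>> (1 : Nat) = m / 2 := by
  rw [Int.shiftRight_eq_div_pow]; norm_num

theorem key (n : Int) : num2addr_py n = num2addr_py_alt n := by
  have hmod : PySem.Int.mod n 16 = n % 16 :=
    PySem.Int.mod_eq_emod_of_pos (by norm_num)
  simp only [num2addr_py, num2addr_py_alt, hmod, List.range, List.range.loop, List.foldl,
    band_one_emod, shiftRight_one_div]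
  have h0 : n % 2 = 0 ∨ n % 2 = 1 := Int.emod_two_eq n
  have h1 : n / 2 % 2 = 0 ∨ n / 2 % 2 = 1 := Int.emod_two_eq _
  have h2 : n / 2 / 2 % 2 = 0 ∨ n / 2 / 2 % 2 = 1 := Int.emod_two_eq _
  have h3 : n / 2 / 2 / 2 % 2 = 0 ∨ n / 2 / 2 / 2 % 2 = 1 := Int.emod_two_eq _
  have h16 : n % 16 = n % 2 + 2 * (n / 2 % 2) + 4 * (n / 2 / 2 % 2) + 8 * (n / 2 / 2 / 2 % 2) := by
    omega
  rcases h0 with h0 | h0 <;> rcases h1 with h1 | h1 <;> rcases h2 with h2 | h2 <;>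
    rcases h3 with h3 | h3 <;>
    rw [h16, h0, h1, h2, h3] <;> norm_num [h0, h1, h2, h3, addrTable] <;> decide

-- ===== VERDICT (by name: the statement is the Claim_ definition above) =====
theorem num2addr_py_spec : Claim_equal_num2addr_py := by
  intro n _
  unfold Spec_num2addr_py
  exact key n
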